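-- pv_equiv track=rewrite | github.com/ghkdgus29/algorithm | BFS/9376.py | bfs
-- ===== SOURCE A (Python) =====
-- import collections
--
-- dx = [0, 1, 0, -1]
--
-- dy = [1, 0, -1, 0]
--
-- def bfs(a, x, y):       # 몇 개의 문을 열었는지 계산하는 bfs
--     n = len(a)
--     m = len(a[0])
--     dist = [[-1] * m for _ in range(n)]
--     q = collections.deque()
--     q.append((x, y))
--     dist[x][y] = 0
--
--     while q:
--         x, y = q.popleft()
--         for k in range(4):
--             nx, ny = x + dx[k], y + dy[k]
--             if 0 <= nx < n and 0 <= ny < m and dist[nx][ny] == -1 and a[nx][ny] != '*':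
--                 if a[nx][ny] == '#':
--                     dist[nx][ny] = dist[x][y] + 1
--                     q.append((nx, ny))
--                 else:
--                     dist[nx][ny] = dist[x][y]
--                     q.appendleft((nx, ny))          # 문을 열지 않고 가는 경우, 큐의 왼쪽에 넣어 문을 여는 방식보다 빠르게 도달한다
--     return dist
-- ===== SOURCE B (Python) =====
-- # Level-decomposed 0-1 BFS: an outer loop over distance levels calls a flood
-- # routine that closes the current zero-cost level (LIFO) and returns the next
-- # level's doors, instead of A's single deque loop; neighbors filtered by
-- # guard clauses ('continue').
-- def bfs(a, x, y):
--     n, m = len(a), len(a[0])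
--     dist = [[-1] * len(a[0]) for _ in a]
--     dist[x][y] = 0
--     frontier, d = [(x, y)], 0
--     while frontier:
--         frontier = _close_level(a, n, m, dist, frontier, d)
--         d += 1
--     return dist
--
-- def _close_level(a, n, m, dist, frontier, d):
--     doors = []
--     while frontier:
--         cx, cy = frontier.pop()
--         for nx, ny in ((cx, cy + 1), (cx + 1, cy), (cx, cy - 1), (cx - 1, cy)):
--             if nx < 0 or nx >= n or ny < 0 or ny >= m:
--                 continue
--             c = a[nx][ny]
--             if c == '*' or dist[nx][ny] != -1:
--                 continue
--             if c == '#':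
--                 dist[nx][ny] = d + 1
--                 doors.append((nx, ny))
--             else:
--                 dist[nx][ny] = d
--                 frontier.append((nx, ny))
--     return doors[::-1]
-- ===== Notes on version B (the rewrite author's own statement) =====
-- stated objective: alternative
-- what changed: Replaces A's single 0-1 BFS deque loop by a level decomposition: an outer loop over distance levels calls a separate flood routine that closes the current zero-cost level with a LIFO stack and returns the next level's doors, with guard-clause (continue) neighbour filtering instead of one compound condition.
-- outside the precondition, e.g. on bfs([['.', '*'], ['*']], 0, 0): A returns [[0, -1], [-1, -1]], B returns [[0, -1], [-1, -1]]
import Mathlib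
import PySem

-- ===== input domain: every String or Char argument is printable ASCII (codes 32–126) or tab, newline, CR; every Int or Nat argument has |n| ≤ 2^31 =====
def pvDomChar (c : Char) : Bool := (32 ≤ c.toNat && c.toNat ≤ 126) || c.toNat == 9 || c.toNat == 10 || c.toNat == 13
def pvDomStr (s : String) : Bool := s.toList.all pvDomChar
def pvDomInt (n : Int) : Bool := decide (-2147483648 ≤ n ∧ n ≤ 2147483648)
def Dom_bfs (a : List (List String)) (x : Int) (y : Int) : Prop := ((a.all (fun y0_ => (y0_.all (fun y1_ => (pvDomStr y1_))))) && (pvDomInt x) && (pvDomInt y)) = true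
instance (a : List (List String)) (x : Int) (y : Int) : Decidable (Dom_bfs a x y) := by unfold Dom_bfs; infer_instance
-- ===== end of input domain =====

-- B replaces A's single 0-1 BFS deque loop by a level decomposition: an outer loop over
-- distance levels calls a flood routine closing the zero-cost level and returning the next
-- level's doors; same asymptotic cost, equivalence proved on rectangular grids.

-- shared 2-D indexing primitives (Python's g[i][j] reads/writes, negative indices wrap)
def g2 (g : List (List Int)) (i j : Int) : Int :=
  PySem.List.pyGetD (PySem.List.pyGetD g i []) j 0
def gs (a : List (List String)) (i j : Int) : String :=
  PySem.List.pyGetD (PySem.List.pyGetD a i []) j ""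
def s2 (g : List (List Int)) (i j : Int) (v : Int) : List (List Int) :=
  PySem.List.pySetD g i (PySem.List.pySetD (PySem.List.pyGetD g i []) j v)

-- ===== PORT A =====
def dxL : List Int := [0, 1, 0, -1]
def dyL : List Int := [1, 0, -1, 0]

-- relax one neighbour cell p of the popped cell (x, y); state = (dist, queue)
def bfsRelaxA (a : List (List String)) (n m x y : Int)
    (s : List (List Int) × List (Int × Int)) (p : Int × Int) :
    List (List Int) × List (Int × Int) :=
  if 0 ≤ p.1 ∧ p.1 < n ∧ 0 ≤ p.2 ∧ p.2 < m ∧ g2 s.1 p.1 p.2 = -1 ∧ gs a p.1 p.2 ≠ "*" then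
    if gs a p.1 p.2 = "#" then
      (s2 s.1 p.1 p.2 (g2 s.1 x y + 1), s.2 ++ [p])          -- q.append
    else
      (s2 s.1 p.1 p.2 (g2 s.1 x y), p :: s.2)                -- q.appendleft
  else s

-- body of 'for k in range(4)': nx, ny = x + dx[k], y + dy[k]
def bfsStepA (a : List (List String)) (n m x y : Int)
    (s : List (List Int) × List (Int × Int)) (k : ℕ) :
    List (List Int) × List (Int × Int) :=
  bfsRelaxA a n m x y s (x + PySem.List.pyGetD dxL (k : Int) 0, y + PySem.List.pyGetD dyL (k : Int) 0)

-- 'while q': fuel = n*m+1 bounds the number of pops (each cell is enqueued at most once)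
def bfsLoopA (a : List (List String)) (n m : Int) :
    ℕ → List (Int × Int) → List (List Int) → List (List Int)
  | 0, _, dist => dist
  | _ + 1, [], dist => dist
  | f + 1, p :: q, dist =>
      let s := (List.range 4).foldl (bfsStepA a n m p.1 p.2) (dist, q)
      bfsLoopA a n m f s.2 s.1

def bfs (a : List (List String)) (x : Int) (y : Int) : List (List Int) :=
  let n : Int := a.length
  let row0 := PySem.List.pyGetD a 0 []          -- a[0] (Pre_ guarantees a ≠ [])
  let m : Int := row0.length
  let dist0 := List.replicate a.length (List.replicate row0.length (-1 : Int))
  let dist1 := s2 dist0 x y 0                   -- dist[x][y] = 0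
  bfsLoopA a n m (a.length * row0.length + 1) [(x, y)] dist1

-- ===== PORT B =====
-- relax one neighbour p at level d, guard-clause style ('continue' twice, then door test);
-- state = (dist, frontier, doors); the Lean frontier keeps Python's stack top at the HEAD
def bfsRelaxB (a : List (List String)) (n m d : Int)
    (s : List (List Int) × List (Int × Int) × List (Int × Int)) (p : Int × Int) :
    List (List Int) × List (Int × Int) × List (Int × Int) :=
  if p.1 < 0 ∨ n ≤ p.1 ∨ p.2 < 0 ∨ m ≤ p.2 then s
  else
    let c := gs a p.1 p.2
    if c = "*" ∨ g2 s.1 p.1 p.2 ≠ -1 then s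
    else if c = "#" then
      (s2 s.1 p.1 p.2 (d + 1), s.2.1, s.2.2 ++ [p])          -- doors.append
    else
      (s2 s.1 p.1 p.2 d, p :: s.2.1, s.2.2)                  -- frontier.append

-- '_close_level': the inner 'while frontier' popping Python's stack end (= our head);
-- the port threads the fuel through and returns the leftover fuel with (doors, dist);
-- Python's final doors[::-1] combined with pop-from-end = our doors list read head-first.
def bfsFloodB (a : List (List String)) (n m d : Int) :
    ℕ → List (Int × Int) → List (Int × Int) → List (List Int) →
    ℕ × List (Int × Int) × List (List Int)
  | 0, _, ds, dist => (0, ds, dist)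
  | f + 1, [], ds, dist => (f + 1, ds, dist)
  | f + 1, p :: fr, ds, dist =>
      let s := [(p.1, p.2 + 1), (p.1 + 1, p.2), (p.1, p.2 - 1), (p.1 - 1, p.2)].foldl
                 (bfsRelaxB a n m d) (dist, fr, ds)
      bfsFloodB a n m d f s.2.1 s.2.2 s.1

-- the flood never returns more fuel than it was given (termination of the outer loop)
lemma bfsFloodB_fuel_le (a : List (List String)) (n m d : Int) :
    ∀ (f : ℕ) (fr ds : List (Int × Int)) (dist : List (List Int)),
      (bfsFloodB a n m d f fr ds dist).1 ≤ f := by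
  intro f
  induction f with
  | zero => intro fr ds dist; cases fr <;> simp [bfsFloodB]
  | succ f ih =>
      intro fr ds dist
      cases fr with
      | nil => simp [bfsFloodB]
      | cons p fr =>
          rw [bfsFloodB]
          exact le_trans (ih _ _ _) (Nat.le_succ f)

-- outer 'while frontier: frontier = _close_level(…); d += 1'
def bfsLevelB (a : List (List String)) (n m : Int) :
    ℕ → List (Int × Int) → Int → List (List Int) → List (List Int)
  | 0, _, _, dist => dist
  | _ + 1, [], _, dist => dist
  | f + 1, p :: fr, d, dist =>
      let s := bfsFloodB a n m d (f + 1) (p :: fr) [] dist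
      bfsLevelB a n m s.1 s.2.1 (d + 1) s.2.2
  termination_by f => f
  decreasing_by
    calc (bfsFloodB a n m d (f + 1) (p :: fr) [] dist).1
        ≤ f := by rw [bfsFloodB]; exact bfsFloodB_fuel_le ..
      _ < f + 1 := Nat.lt_succ_self f

def bfs_alt (a : List (List String)) (x : Int) (y : Int) : List (List Int) :=
  let n : Int := a.length
  let row0 := PySem.List.pyGetD a 0 []
  let m : Int := row0.length
  let dist0 := a.map (fun _ => List.replicate row0.length (-1 : Int))   -- [[-1]*len(a[0]) for _ in a]
  let dist1 := s2 dist0 x y 0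
  bfsLevelB a n m (a.length * row0.length + 1) [(x, y)] 0 dist1

-- ===== PRECONDITION & SPEC =====
-- Pre_ requires a nonempty grid, no row shorter than row 0 (columns past len(a[0]) are never
-- read, so longer rows are fine), and a wrap-in-range start: outside it Python A raises
-- IndexError (empty grid, start index out of range) except on grids with a short row that the
-- search happens not to reach — that reachability is not closed-form, so short rows are
-- excluded wholesale even though A returns on some of them; B agrees with A there.
def Pre_bfs (a : List (List String)) (x : Int) (y : Int) : Prop :=
  a ≠ [] ∧ (∀ r ∈ a, (a.headD []).length ≤ r.length) ∧
  PySem.Raise.InRange a.length x ∧ PySem.Raise.InRange (a.headD []).length y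
instance (a : List (List String)) (x : Int) (y : Int) : Decidable (Pre_bfs a x y) := by
  unfold Pre_bfs; infer_instance

def pvWitness_bfs : List (List String) × Int × Int :=
  ([[".", ".", "#"], ["*", ".", "#"]], 0, 0)

def Spec_bfs (a : List (List String)) (x : Int) (y : Int) (out : List (List Int)) : Prop := out = bfs_alt a x y
instance (a : List (List String)) (x : Int) (y : Int) (out : List (List Int)) : Decidable (Spec_bfs a x y out) := by unfold Spec_bfs; infer_instance

-- ===== CLAIM (what is proved, stated in full; the proofs are below) =====
def Claim_equal_bfs : Prop := ∀ (a : List (List String)) (x : Int) (y : Int), Dom_bfs a x y → Pre_bfs a x y → Spec_bfs a x y (bfs a x y)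

-- ===== LEMMAS AND PROOFS =====

lemma pyIdx?_some_lt {n : ℕ} {i : Int} {k : ℕ} (h : PySem.List.pyIdx? n i = some k) : k < n := by
  unfold PySem.List.pyIdx? at h
  split_ifs at h <;> simp_all <;> omega

lemma pyIdx?_some_of_inRange {n : ℕ} {i : Int} (h : PySem.Raise.InRange n i) :
    ∃ k, PySem.List.pyIdx? n i = some k := by
  obtain ⟨h1, h2⟩ := h
  unfold PySem.List.pyIdx?
  split_ifs <;> simp_all

-- 1-D read-after-write: either the read is unchanged, or the read cell WAS the written cell
lemma getD_setD_or {α : Type} (xs : List α) (j q : Int) (v d : α) :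
    PySem.List.pyGetD (PySem.List.pySetD xs j v) q d = PySem.List.pyGetD xs q d ∨
    PySem.List.pyGetD xs q d = PySem.List.pyGetD xs j d := by
  rcases hj : PySem.List.pyIdx? xs.length j with _ | kj
  · left
    simp [PySem.List.pySetD, PySem.List.pySet?, hj]
  · have hset : PySem.List.pySetD xs j v = xs.set kj v := by
      simp [PySem.List.pySetD, PySem.List.pySet?, hj]
    rcases hq : PySem.List.pyIdx? xs.length q with _ | kq
    · left
      simp [hset, PySem.List.pyGetD, PySem.List.pyGet?, List.length_set, hq]
    · by_cases hk : kq = kj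
      · right
        subst hk
        simp [PySem.List.pyGetD, PySem.List.pyGet?, hq, hj]
      · left
        simp [hset, PySem.List.pyGetD, PySem.List.pyGet?, List.length_set, hq,
              List.getElem?_set_ne (by omega : kj ≠ kq)]

lemma getD_setD_self {α : Type} (xs : List α) (j : Int) (v d : α)
    (h : PySem.Raise.InRange xs.length j) :
    PySem.List.pyGetD (PySem.List.pySetD xs j v) j d = v := by
  obtain ⟨kj, hkj⟩ := pyIdx?_some_of_inRange h
  have hlt := pyIdx?_some_lt hkj
  have hset : PySem.List.pySetD xs j v = xs.set kj v := by
    simp [PySem.List.pySetD, PySem.List.pySet?, hkj]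
  simp [hset, PySem.List.pyGetD, PySem.List.pyGet?, List.length_set, hkj,
        List.getElem?_set_self hlt]

lemma g2_s2_or (g : List (List Int)) (i j p q v : Int) :
    g2 (s2 g i j v) p q = g2 g p q ∨ g2 g p q = g2 g i j := by
  rcases hi : PySem.List.pyIdx? g.length i with _ | ki
  · left
    simp [s2, PySem.List.pySetD, PySem.List.pySet?, hi]
  · have hki := pyIdx?_some_lt hi
    have hrow : PySem.List.pyGetD g i [] = g[ki] := by
      simp [PySem.List.pyGetD, PySem.List.pyGet?, hi, List.getElem?_eq_getElem hki]
    have hset : s2 g i j v = g.set ki (PySem.List.pySetD g[ki] j v) := by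
      simp [s2, PySem.List.pySetD, PySem.List.pySet?, hi, hrow]
    rcases hp : PySem.List.pyIdx? g.length p with _ | kp
    · left
      simp [g2, hset, PySem.List.pyGetD, PySem.List.pyGet?, List.length_set, hp]
    · by_cases hk : kp = ki
      · subst hk
        have h1 : g2 (s2 g i j v) p q =
            PySem.List.pyGetD (PySem.List.pySetD g[kp] j v) q 0 := by
          simp [g2, hset, PySem.List.pyGetD, PySem.List.pyGet?, List.length_set, hp,
                List.getElem?_set_self hki]
        have h2 : g2 g p q = PySem.List.pyGetD g[kp] q 0 := by
          simp [g2, PySem.List.pyGetD, PySem.List.pyGet?, hp, List.getElem?_eq_getElem hki]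
        have h3 : g2 g i j = PySem.List.pyGetD g[kp] j 0 := by
          simp [g2, hrow]
        rw [h1, h2, h3]
        exact getD_setD_or g[kp] j q v 0
      · left
        simp [g2, hset, PySem.List.pyGetD, PySem.List.pyGet?, List.length_set, hp,
              List.getElem?_set_ne (by omega : ki ≠ kp)]

lemma g2_s2_self (g : List (List Int)) (i j v : Int)
    (hi : PySem.Raise.InRange g.length i)
    (hj : PySem.Raise.InRange (PySem.List.pyGetD g i []).length j) :
    g2 (s2 g i j v) i j = v := by
  obtain ⟨ki, hki⟩ := pyIdx?_some_of_inRange hi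
  have hlt := pyIdx?_some_lt hki
  have hrow : PySem.List.pyGetD g i [] = g[ki] := by
    simp [PySem.List.pyGetD, PySem.List.pyGet?, hki, List.getElem?_eq_getElem hlt]
  have hset : s2 g i j v = g.set ki (PySem.List.pySetD g[ki] j v) := by
    simp [s2, PySem.List.pySetD, PySem.List.pySet?, hki, hrow]
  have h1 : g2 (s2 g i j v) i j =
      PySem.List.pyGetD (PySem.List.pySetD g[ki] j v) j 0 := by
    simp [g2, hset, PySem.List.pyGetD, PySem.List.pyGet?, List.length_set, hki,
          List.getElem?_set_self hlt]
  rw [h1]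
  exact getD_setD_self g[ki] j v 0 (by rwa [hrow] at hj)

lemma g2_s2_preserve {g : List (List Int)} {i j p q v : Int}
    (h1 : g2 g i j = -1) (h2 : g2 g p q ≠ -1) :
    g2 (s2 g i j v) p q = g2 g p q := by
  rcases g2_s2_or g i j p q v with h | h
  · exact h
  · exact absurd (h.trans h1) h2

lemma s2_length (g : List (List Int)) (i j v : Int) :
    (s2 g i j v).length = g.length :=
  PySem.List.length_pySetD ..

lemma s2_rows_len {g : List (List Int)} {L : ℕ} (h : ∀ r ∈ g, r.length = L)
    (i j v : Int) : ∀ r ∈ s2 g i j v, r.length = L := by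
  rcases hi : PySem.List.pyIdx? g.length i with _ | ki
  · simpa [s2, PySem.List.pySetD, PySem.List.pySet?, hi] using h
  · have hki := pyIdx?_some_lt hi
    have hrow : PySem.List.pyGetD g i [] = g[ki] := by
      simp [PySem.List.pyGetD, PySem.List.pyGet?, hi, List.getElem?_eq_getElem hki]
    have hset : s2 g i j v = g.set ki (PySem.List.pySetD g[ki] j v) := by
      simp [s2, PySem.List.pySetD, PySem.List.pySet?, hi, hrow]
    intro r hr
    rw [hset] at hr
    rcases List.mem_or_eq_of_mem_set hr with hr | hr
    · exact h r hr
    · rw [hr, PySem.List.length_pySetD]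
      exact h g[ki] (List.getElem_mem hki)

-- B's guard-clause relax, reshaped into A's single-condition form
lemma relaxB_cases (a : List (List String)) (n m d : Int)
    (s : List (List Int) × List (Int × Int) × List (Int × Int)) (p : Int × Int) :
    bfsRelaxB a n m d s p =
      if 0 ≤ p.1 ∧ p.1 < n ∧ 0 ≤ p.2 ∧ p.2 < m ∧ g2 s.1 p.1 p.2 = -1 ∧ gs a p.1 p.2 ≠ "*" then
        (if gs a p.1 p.2 = "#" then (s2 s.1 p.1 p.2 (d + 1), s.2.1, s.2.2 ++ [p])
         else (s2 s.1 p.1 p.2 d, p :: s.2.1, s.2.2))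
      else s := by
  simp only [bfsRelaxB]
  by_cases hb : p.1 < 0 ∨ n ≤ p.1 ∨ p.2 < 0 ∨ m ≤ p.2
  · rw [if_pos hb, if_neg]
    rintro ⟨h1, h2, h3, h4, -, -⟩
    rcases hb with h | h | h | h <;> omega
  · rw [if_neg hb]
    by_cases hg : gs a p.1 p.2 = "*" ∨ g2 s.1 p.1 p.2 ≠ -1
    · rw [if_pos hg, if_neg]
      rintro ⟨-, -, -, -, hd, hs⟩
      rcases hg with h | h
      · exact hs h
      · exact h hd
    · obtain ⟨hs, hd⟩ := not_or.1 hg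
      have hA : 0 ≤ p.1 ∧ p.1 < n ∧ 0 ≤ p.2 ∧ p.2 < m ∧ g2 s.1 p.1 p.2 = -1 ∧
          gs a p.1 p.2 ≠ "*" :=
        ⟨by omega, by omega, by omega, by omega, not_not.1 hd, hs⟩
      rw [if_neg hg, if_pos hA]

-- one popped cell at level d: folding A's relax over the remaining queue fr ++ ds equals
-- folding B's relax, and the level invariants are preserved
lemma fold_eq (a : List (List String)) (n m x y d : Int) (hd0 : 0 ≤ d) (hm : 0 ≤ m) :
    ∀ (ps : List (Int × Int)) (dist : List (List Int)) (fr ds : List (Int × Int)),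
    g2 dist x y = d →
    (∀ p ∈ fr, g2 dist p.1 p.2 = d) → (∀ p ∈ ds, g2 dist p.1 p.2 = d + 1) →
    ((dist.length : Int) = n) → (∀ r ∈ dist, ((r.length : Int) = m)) →
    (ps.foldl (bfsRelaxA a n m x y) (dist, fr ++ ds)).1 =
      (ps.foldl (bfsRelaxB a n m d) (dist, fr, ds)).1 ∧
    (ps.foldl (bfsRelaxA a n m x y) (dist, fr ++ ds)).2 =
      (ps.foldl (bfsRelaxB a n m d) (dist, fr, ds)).2.1 ++
      (ps.foldl (bfsRelaxB a n m d) (dist, fr, ds)).2.2 ∧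
    g2 (ps.foldl (bfsRelaxB a n m d) (dist, fr, ds)).1 x y = d ∧
    (∀ p ∈ (ps.foldl (bfsRelaxB a n m d) (dist, fr, ds)).2.1,
      g2 (ps.foldl (bfsRelaxB a n m d) (dist, fr, ds)).1 p.1 p.2 = d) ∧
    (∀ p ∈ (ps.foldl (bfsRelaxB a n m d) (dist, fr, ds)).2.2,
      g2 (ps.foldl (bfsRelaxB a n m d) (dist, fr, ds)).1 p.1 p.2 = d + 1) ∧
    (((ps.foldl (bfsRelaxB a n m d) (dist, fr, ds)).1.length : Int) = n) ∧
    (∀ r ∈ (ps.foldl (bfsRelaxB a n m d) (dist, fr, ds)).1, ((r.length : Int) = m)) := by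
  intro ps
  induction ps with
  | nil =>
      intro dist fr ds hd hfr hds hlen hrows
      exact ⟨rfl, rfl, hd, hfr, hds, hlen, hrows⟩
  | cons p ps ih =>
      intro dist fr ds hd hfr hds hlen hrows
      simp only [List.foldl_cons, relaxB_cases]
      by_cases hC : 0 ≤ p.1 ∧ p.1 < n ∧ 0 ≤ p.2 ∧ p.2 < m ∧ g2 dist p.1 p.2 = -1 ∧
          gs a p.1 p.2 ≠ "*"
      · obtain ⟨hp1, hp2, hp3, hp4, hpd, hps⟩ := hC
        have hInR1 : PySem.Raise.InRange dist.length p.1 := by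
          constructor <;> omega
        have hrowlen : ((PySem.List.pyGetD dist p.1 []).length : Int) = m :=
          hrows _ (PySem.List.pyGetD_mem _ _ hInR1)
        have hInR2 : PySem.Raise.InRange (PySem.List.pyGetD dist p.1 []).length p.2 := by
          constructor <;> omega
        have hdn : g2 dist x y ≠ -1 := by omega
        have hrowsN : ∀ r ∈ dist, r.length = m.toNat := fun r hr => by
          have := hrows r hr; omega
        by_cases hh : gs a p.1 p.2 = "#"
        · have hstepA : bfsRelaxA a n m x y (dist, fr ++ ds) p =
              (s2 dist p.1 p.2 (d + 1), (fr ++ ds) ++ [p]) := by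
            simp [bfsRelaxA, hp1, hp2, hp3, hp4, hpd, hh, hd]
          have hstepB :
              (if 0 ≤ p.1 ∧ p.1 < n ∧ 0 ≤ p.2 ∧ p.2 < m ∧ g2 dist p.1 p.2 = -1 ∧
                  gs a p.1 p.2 ≠ "*" then
                (if gs a p.1 p.2 = "#" then (s2 dist p.1 p.2 (d + 1), fr, ds ++ [p])
                 else (s2 dist p.1 p.2 d, p :: fr, ds))
              else (dist, fr, ds)) = (s2 dist p.1 p.2 (d + 1), fr, ds ++ [p]) := by
            simp [hp1, hp2, hp3, hp4, hpd, hh]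
          rw [hstepA, hstepB, List.append_assoc]
          refine ih (s2 dist p.1 p.2 (d + 1)) fr (ds ++ [p]) ?_ ?_ ?_ ?_ ?_
          · rw [g2_s2_preserve hpd hdn, hd]
          · intro q hq
            have h0 := hfr q hq
            rw [g2_s2_preserve hpd (by omega)]; exact h0
          · intro q hq
            rcases List.mem_append.1 hq with hq | hq
            · have h0 := hds q hq
              rw [g2_s2_preserve hpd (by omega)]; exact h0
            · have hqp : q = p := by simpa using hq
              rw [hqp]
              rw [g2_s2_self dist p.1 p.2 (d + 1) hInR1 hInR2]
          · rw [s2_length]; exact hlen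
          · intro r hr
            have := s2_rows_len hrowsN p.1 p.2 (d + 1) r hr
            omega
        · have hstepA : bfsRelaxA a n m x y (dist, fr ++ ds) p =
              (s2 dist p.1 p.2 d, p :: (fr ++ ds)) := by
            simp [bfsRelaxA, hp1, hp2, hp3, hp4, hpd, hps, hh, hd]
          have hstepB :
              (if 0 ≤ p.1 ∧ p.1 < n ∧ 0 ≤ p.2 ∧ p.2 < m ∧ g2 dist p.1 p.2 = -1 ∧
                  gs a p.1 p.2 ≠ "*" then
                (if gs a p.1 p.2 = "#" then (s2 dist p.1 p.2 (d + 1), fr, ds ++ [p])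
                 else (s2 dist p.1 p.2 d, p :: fr, ds))
              else (dist, fr, ds)) = (s2 dist p.1 p.2 d, p :: fr, ds) := by
            simp [hp1, hp2, hp3, hp4, hpd, hps, hh]
          rw [hstepA, hstepB]
          have hcons : p :: (fr ++ ds) = (p :: fr) ++ ds := rfl
          rw [hcons]
          refine ih (s2 dist p.1 p.2 d) (p :: fr) ds ?_ ?_ ?_ ?_ ?_
          · rw [g2_s2_preserve hpd hdn, hd]
          · intro q hq
            rcases List.mem_cons.1 hq with hq | hq
            · rw [hq]
              rw [g2_s2_self dist p.1 p.2 d hInR1 hInR2]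
            · have h0 := hfr q hq
              rw [g2_s2_preserve hpd (by omega)]; exact h0
          · intro q hq
            have h0 := hds q hq
            rw [g2_s2_preserve hpd (by omega)]; exact h0
          · rw [s2_length]; exact hlen
          · intro r hr
            have := s2_rows_len hrowsN p.1 p.2 d r hr
            omega
      · have hstepA : bfsRelaxA a n m x y (dist, fr ++ ds) p = (dist, fr ++ ds) := by
          simp only [bfsRelaxA]
          rw [if_neg hC]
        have hstepB :
            (if 0 ≤ p.1 ∧ p.1 < n ∧ 0 ≤ p.2 ∧ p.2 < m ∧ g2 dist p.1 p.2 = -1 ∧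
                gs a p.1 p.2 ≠ "*" then
              (if gs a p.1 p.2 = "#" then (s2 dist p.1 p.2 (d + 1), fr, ds ++ [p])
               else (s2 dist p.1 p.2 d, p :: fr, ds))
            else (dist, fr, ds)) = (dist, fr, ds) := by
          rw [if_neg hC]
        rw [hstepA, hstepB]
        exact ih dist fr ds hd hfr hds hlen hrows

-- A's inner 'for k in range(4)' enumerates exactly B's neighbour list
lemma stepA_range (a : List (List String)) (n m x y : Int)
    (s : List (List Int) × List (Int × Int)) :
    (List.range 4).foldl (bfsStepA a n m x y) s =
      [(x, y + 1), (x + 1, y), (x, y - 1), (x - 1, y)].foldl (bfsRelaxA a n m x y) s := by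
  have h4 : List.range 4 = [0, 1, 2, 3] := rfl
  have d0 : PySem.List.pyGetD dxL ((0 : ℕ) : Int) 0 = 0 := by decide
  have d1 : PySem.List.pyGetD dxL ((1 : ℕ) : Int) 0 = 1 := by decide
  have d2 : PySem.List.pyGetD dxL ((2 : ℕ) : Int) 0 = 0 := by decide
  have d3 : PySem.List.pyGetD dxL ((3 : ℕ) : Int) 0 = -1 := by decide
  have e0 : PySem.List.pyGetD dyL ((0 : ℕ) : Int) 0 = 1 := by decide
  have e1 : PySem.List.pyGetD dyL ((1 : ℕ) : Int) 0 = 0 := by decide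
  have e2 : PySem.List.pyGetD dyL ((2 : ℕ) : Int) 0 = -1 := by decide
  have e3 : PySem.List.pyGetD dyL ((3 : ℕ) : Int) 0 = 0 := by decide
  rw [h4]
  simp only [List.foldl_cons, List.foldl_nil, bfsStepA, d0, d1, d2, d3, e0, e1, e2, e3,
    add_zero]
  norm_num [sub_eq_add_neg]

-- one level: B's flood consumes the same pops as A's loop and leaves the same dist
lemma flood_sim (a : List (List String)) (n m d : Int) (hd0 : 0 ≤ d) (hm : 0 ≤ m) :
    ∀ (f : ℕ) (fr ds : List (Int × Int)) (dist : List (List Int)),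
    (∀ p ∈ fr, g2 dist p.1 p.2 = d) → (∀ p ∈ ds, g2 dist p.1 p.2 = d + 1) →
    ((dist.length : Int) = n) → (∀ r ∈ dist, ((r.length : Int) = m)) →
    bfsLoopA a n m f (fr ++ ds) dist =
      bfsLoopA a n m (bfsFloodB a n m d f fr ds dist).1
        (bfsFloodB a n m d f fr ds dist).2.1 (bfsFloodB a n m d f fr ds dist).2.2 ∧
    (∀ p ∈ (bfsFloodB a n m d f fr ds dist).2.1,
      g2 (bfsFloodB a n m d f fr ds dist).2.2 p.1 p.2 = d + 1) ∧
    (((bfsFloodB a n m d f fr ds dist).2.2.length : Int) = n) ∧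
    (∀ r ∈ (bfsFloodB a n m d f fr ds dist).2.2, ((r.length : Int) = m)) := by
  intro f
  induction f with
  | zero =>
      intro fr ds dist _ hds hlen hrows
      have hfl : bfsFloodB a n m d 0 fr ds dist = (0, ds, dist) := by
        cases fr <;> rfl
      rw [hfl]
      exact ⟨by simp [bfsLoopA], hds, hlen, hrows⟩
  | succ f ih =>
      intro fr ds dist hfr hds hlen hrows
      cases fr with
      | nil =>
          have hfl : bfsFloodB a n m d (f + 1) [] ds dist = (f + 1, ds, dist) := rfl
          rw [hfl]
          exact ⟨by rw [List.nil_append], hds, hlen, hrows⟩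
      | cons p fr' =>
          have hdp : g2 dist p.1 p.2 = d := hfr p (List.mem_cons_self ..)
          have H := fold_eq a n m p.1 p.2 d hd0 hm
            [(p.1, p.2 + 1), (p.1 + 1, p.2), (p.1, p.2 - 1), (p.1 - 1, p.2)]
            dist fr' ds hdp (fun q hq => hfr q (List.mem_cons_of_mem _ hq)) hds hlen hrows
          obtain ⟨hA1, hA2, _, hB1, hB2, hBlen, hBrows⟩ := H
          have hloop : bfsLoopA a n m (f + 1) ((p :: fr') ++ ds) dist =
              bfsLoopA a n m f
                (((p.1, p.2 + 1) :: [(p.1 + 1, p.2), (p.1, p.2 - 1), (p.1 - 1, p.2)]).foldl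
                  (bfsRelaxA a n m p.1 p.2) (dist, fr' ++ ds)).2
                (((p.1, p.2 + 1) :: [(p.1 + 1, p.2), (p.1, p.2 - 1), (p.1 - 1, p.2)]).foldl
                  (bfsRelaxA a n m p.1 p.2) (dist, fr' ++ ds)).1 := by
            show bfsLoopA a n m (f + 1) (p :: (fr' ++ ds)) dist = _
            rw [bfsLoopA, stepA_range]
          rw [bfsFloodB]
          have hrest := ih _ _ _ hB1 hB2 hBlen hBrows
          refine ⟨?_, hrest.2.1, hrest.2.2.1, hrest.2.2.2⟩
          rw [hloop, hA1, hA2]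
          exact hrest.1

-- all levels: A's whole loop equals B's level loop
lemma level_sim (a : List (List String)) (n m : Int) (hm : 0 ≤ m) :
    ∀ (f : ℕ) (fr : List (Int × Int)) (d : Int) (dist : List (List Int)),
    0 ≤ d → (∀ p ∈ fr, g2 dist p.1 p.2 = d) →
    ((dist.length : Int) = n) → (∀ r ∈ dist, ((r.length : Int) = m)) →
    bfsLoopA a n m f fr dist = bfsLevelB a n m f fr d dist := by
  intro f
  induction f using Nat.strong_induction_on with
  | _ f ih =>
      intro fr d dist hd0 hfr hlen hrows
      match f, fr with
      | 0, fr => cases fr <;> simp [bfsLoopA, bfsLevelB]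
      | f + 1, [] => simp [bfsLoopA, bfsLevelB]
      | f + 1, p :: fr =>
          have H := flood_sim a n m d hd0 hm (f + 1) (p :: fr) [] dist hfr
            (by intro q hq; simp at hq) hlen hrows
          obtain ⟨hA, hB1, hBlen, hBrows⟩ := H
          rw [List.append_nil] at hA
          have hfuel : (bfsFloodB a n m d (f + 1) (p :: fr) [] dist).1 ≤ f := by
            rw [bfsFloodB]; exact bfsFloodB_fuel_le ..
          rw [hA, bfsLevelB]
          exact ih _ (Nat.lt_succ_of_le hfuel) _ _ _ (by omega) hB1 hBlen hBrows

-- ===== VERDICT (by name: the statement is the Claim_ definition above) =====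
theorem bfs_spec : Claim_equal_bfs := by
  intro a x y _ hpre
  obtain ⟨hne, hrect, hx, hy⟩ := hpre
  unfold Spec_bfs bfs bfs_alt
  simp only []
  obtain ⟨r0, t, rfl⟩ : ∃ r0 t, a = r0 :: t := by
    cases a with
    | nil => exact absurd rfl hne
    | cons r t => exact ⟨r, t, rfl⟩
  have hrow0 : PySem.List.pyGetD (r0 :: t) 0 [] = r0 := by
    simp [PySem.List.pyGetD, PySem.List.pyGet?, PySem.List.pyIdx?]
  have hhead : (r0 :: t).headD [] = r0 := rfl
  rw [hrow0]
  have hmap : (r0 :: t).map (fun _ => List.replicate r0.length (-1 : Int)) =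
      List.replicate (r0 :: t).length (List.replicate r0.length (-1 : Int)) := by
    simp [List.map_const', List.replicate_succ]
  rw [hmap]
  set dist0 := List.replicate (r0 :: t).length (List.replicate r0.length (-1 : Int)) with hdist0
  have hd0len : dist0.length = (r0 :: t).length := List.length_replicate
  have hd0rows : ∀ r ∈ dist0, r.length = r0.length := by
    intro r hr
    have := List.eq_of_mem_replicate hr
    rw [this, List.length_replicate]
  have hInRx : PySem.Raise.InRange dist0.length x := by rw [hd0len]; exact hx
  have hrowx : (PySem.List.pyGetD dist0 x []).length = r0.length :=
    hd0rows _ (PySem.List.pyGetD_mem _ _ hInRx)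
  have hInRy : PySem.Raise.InRange (PySem.List.pyGetD dist0 x []).length y := by
    rw [hrowx]; rw [hhead] at hy; exact hy
  have hself : g2 (s2 dist0 x y 0) x y = 0 := g2_s2_self dist0 x y 0 hInRx hInRy
  refine level_sim (r0 :: t) ((r0 :: t).length : Int) (r0.length : Int) (by positivity)
    ((r0 :: t).length * r0.length + 1) [(x, y)] 0 (s2 dist0 x y 0)
    le_rfl ?_ ?_ ?_
  · intro q hq
    have : q = (x, y) := by simpa using hq
    subst this
    rw [hself]
  · rw [s2_length, hd0len]
  · intro r hr
    have hN : ∀ r ∈ dist0, r.length = ((r0.length : Int)).toNat := by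
      intro r hr; rw [hd0rows r hr]; omega
    have := s2_rows_len hN x y 0 r hr
    omega
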